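-- pv_equiv track=rewrite | github.com/Lamella-ai/lamella | src/lamella/utils/_legacy_meta.py | _renamed_tags
-- ===== SOURCE A (Python) =====
-- from typing import Any, Iterable
--
-- _LEGACY = "bcg-"
--
-- _NEW = "lamella-"
--
-- _LEGACY_LEN = len(_LEGACY)
--
-- def _renamed_tags(tags: Any) -> Any | None:
--     """Return a new frozenset if any tag was rewritten, else None.
--
--     Tags are an immutable frozenset on Transaction; we replace the
--     field via ``_replace`` only if the rename is non-empty.
--     """
--     if tags is None:
--         return None
--     out = set()
--     changed = False
--     for t in tags:
--         if isinstance(t, str) and t.startswith(_LEGACY):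
--             out.add(_NEW + t[_LEGACY_LEN:])
--             changed = True
--         else:
--             out.add(t)
--     if not changed:
--         return None
--     return frozenset(out)
-- ===== SOURCE B (Python) =====
-- from typing import Any
--
-- _LEGACY = "bcg-"
-- _NEW = "lamella-"
-- _LEGACY_LEN = len(_LEGACY)
--
--
-- def _is_legacy(t: Any) -> bool:
--     return isinstance(t, str) and t.startswith(_LEGACY)
--
--
-- def _rename(t: Any) -> Any:
--     return _NEW + t[_LEGACY_LEN:] if _is_legacy(t) else t
--
--
-- def _renamed_tags(tags: Any) -> Any | None:
--     """Staged version: a short-circuit detection pass first (no state, no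
--     flag), then, only when a legacy tag exists, one comprehension that
--     rewrites every tag unconditionally into the frozenset."""
--     if tags is None:
--         return None
--     if not any(_is_legacy(t) for t in tags):
--         return None
--     return frozenset(_rename(t) for t in tags)
-- ===== Notes on version B (the rewrite author's own statement) =====
-- stated objective: simpler
-- what changed: Replaces A's single pass that interleaves conditional set-building with a 'changed' flag by two staged passes: a short-circuiting any() detection pass that returns None early, and a stateless comprehension that maps the rename over all tags into the frozenset only when needed.
import Mathlib
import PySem

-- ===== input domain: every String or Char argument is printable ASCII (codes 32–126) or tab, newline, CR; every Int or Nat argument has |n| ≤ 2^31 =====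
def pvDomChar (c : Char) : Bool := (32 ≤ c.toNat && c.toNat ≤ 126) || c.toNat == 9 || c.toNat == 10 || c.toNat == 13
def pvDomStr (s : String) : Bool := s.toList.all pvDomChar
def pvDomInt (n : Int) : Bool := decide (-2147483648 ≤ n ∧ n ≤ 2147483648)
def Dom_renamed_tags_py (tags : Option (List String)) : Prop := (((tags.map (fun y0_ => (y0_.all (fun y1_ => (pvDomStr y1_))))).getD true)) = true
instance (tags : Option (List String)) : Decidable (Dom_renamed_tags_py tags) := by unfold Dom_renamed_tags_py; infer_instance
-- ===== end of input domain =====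

-- B replaces A's flag-carrying conditional-add loop by staged passes: a short-circuit detection scan, then one rename map into the set ("simpler" decomposition, same cost).
-- ===== PORT A =====
def renamed_tags_py (tags : Option (List String)) : Option (List String) :=
  match tags with
  | none => none
  | some ts =>
    -- out = set(); changed = False; for t in tags: ...
    let st := ts.foldl (fun (st : PySem.Set String × Bool) t =>
      if PySem.Str.startswith t "bcg-" then
        (PySem.Set.add st.1 (String.ofList ("lamella-".toList ++ (PySem.Str.slice t (some 4) none).toList)), true)
      else
        (PySem.Set.add st.1 t, st.2)) (PySem.Set.empty, false)
    if st.2 then some st.1 else none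

-- ===== PORT B =====
-- _is_legacy(t): isinstance is always true on List String inputs
def pvIsLegacyB (t : String) : Bool := PySem.Str.startswith t "bcg-"

-- _rename(t): "lamella-" + t[4:] if legacy else t (concat as ofList of joined char lists; exact)
def pvRenameB (t : String) : String :=
  if pvIsLegacyB t then
    String.ofList ("lamella-".toList ++ (PySem.Str.slice t (some 4) none).toList)
  else t

def renamed_tags_py_alt (tags : Option (List String)) : Option (List String) :=
  match tags with
  | none => none
  | some ts =>
    if ¬ ts.any pvIsLegacyB then none
    else some (PySem.Set.ofList (ts.map pvRenameB))

-- ===== PRECONDITION & SPEC =====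
def Spec_renamed_tags_py (tags : Option (List String)) (out : Option (List String)) : Prop := out = renamed_tags_py_alt tags
instance (tags : Option (List String)) (out : Option (List String)) : Decidable (Spec_renamed_tags_py tags out) := by unfold Spec_renamed_tags_py; infer_instance

-- ===== CLAIM (what is proved, stated in full; the proofs are below) =====
def Claim_equal_renamed_tags_py : Prop := ∀ (tags : Option (List String)), Dom_renamed_tags_py tags → Spec_renamed_tags_py tags (renamed_tags_py tags)

-- ===== LEMMAS AND PROOFS =====

-- A's loop body, named so the invariant lemma can speak about it (defeq to the lambda in the port)
def pvStepA (st : PySem.Set String × Bool) (t : String) : PySem.Set String × Bool :=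
  if PySem.Str.startswith t "bcg-" then
    (PySem.Set.add st.1 (String.ofList ("lamella-".toList ++ (PySem.Str.slice t (some 4) none).toList)), true)
  else (PySem.Set.add st.1 t, st.2)

-- invariant: A's fold is the add-fold of the renamed list, with the flag tracking 'any legacy'
lemma pvFold_inv (ts : List String) (acc : PySem.Set String) (flag : Bool) :
    ts.foldl pvStepA (acc, flag)
      = ((ts.map pvRenameB).foldl PySem.Set.add acc, flag || ts.any pvIsLegacyB) := by
  induction ts generalizing acc flag with
  | nil => simp
  | cons t ts ih =>
      rw [List.foldl_cons, List.map_cons, List.foldl_cons, List.any_cons]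
      cases h : PySem.Str.startswith t "bcg-" with
      | true =>
          rw [pvStepA, if_pos h, pvRenameB, if_pos (show pvIsLegacyB t = true from h), ih]
          simp only [pvIsLegacyB, h, Bool.true_or, Bool.or_true]
      | false =>
          rw [pvStepA, if_neg (by simpa [PySem.Str.startswith_eq] using h), pvRenameB,
              if_neg (show ¬ pvIsLegacyB t = true by
                simpa [pvIsLegacyB, PySem.Str.startswith_eq] using h), ih]
          simp only [pvIsLegacyB, h, Bool.false_or]

-- ===== VERDICT (by name: the statement is the Claim_ definition above) =====
theorem renamed_tags_py_spec : Claim_equal_renamed_tags_py := by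
  intro tags _
  unfold Spec_renamed_tags_py
  cases tags with
  | none => rfl
  | some ts =>
      show (if (ts.foldl pvStepA (PySem.Set.empty, false)).2
              then some (ts.foldl pvStepA (PySem.Set.empty, false)).1 else none)
           = (if ¬ ts.any pvIsLegacyB then none
              else some (PySem.Set.ofList (ts.map pvRenameB)))
      rw [pvFold_inv]
      cases h : ts.any pvIsLegacyB with
      | true => simp [h, PySem.Set.ofList_eq_foldl, PySem.Set.empty]
      | false => simp [h]
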